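-- pv_equiv track=rewrite | github.com/freeipa/freeipa | ipalib/docformat.py | linkify_rst
-- ===== SOURCE A (Python) =====
-- def linkify_rst(text, xref_commands):
--     """Wrap known hyphenated IPA command names in RST inline-literal markup.
--
--     Only hyphenated words (e.g. ``user-add``) are considered.
--     Single-word topic names are skipped to avoid false positives.
--     Lines with 3+ spaces of indentation (RST code blocks) are left as-is.
--     """
--     out = []
--     for line in text.split('\n'):
--         indent = len(line) - len(line.lstrip(' ')) if line else 0
--         if indent >= 3:
--             out.append(line)
--             continue
--         result = []
--         word = []
--         for ch in line:
--             if ch.islower() or ch.isdigit() or ch == '-':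
--                 word.append(ch)
--             else:
--                 result.append(_flush_word_rst(''.join(word), xref_commands))
--                 word = []
--                 result.append(ch)
--         result.append(_flush_word_rst(''.join(word), xref_commands))
--         out.append(''.join(result))
--     return '\n'.join(out)
--
-- def _flush_word_rst(word, xref_commands):
--     if '-' in word and word in xref_commands:
--         return '``{}``'.format(word)
--     return word
-- ===== SOURCE B (Python) =====
-- def linkify_rst(text, xref_commands):
--     """Wrap known hyphenated IPA command names in RST inline-literal markup.
--
--     Run-based re-implementation: each line is cut into maximal runs of
--     word characters / non-word characters instead of threading a per-char
--     accumulator; word runs go through the wrapping check, other runs are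
--     copied verbatim.
--     """
--     return '\n'.join(_process_line_rst(line, xref_commands)
--                      for line in text.split('\n'))
--
-- def _is_word_char_rst(ch):
--     return ch.islower() or ch.isdigit() or ch == '-'
--
-- def _wrap_word_rst(word, xref_commands):
--     if '-' in word and word in xref_commands:
--         return '``{}``'.format(word)
--     return word
--
-- def _process_line_rst(line, xref_commands):
--     if line.startswith('   '):
--         return line
--     parts = []
--     i, n = 0, len(line)
--     while i < n:
--         j = i + 1
--         if _is_word_char_rst(line[i]):
--             while j < n and _is_word_char_rst(line[j]):
--                 j += 1
--             parts.append(_wrap_word_rst(line[i:j], xref_commands))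
--         else:
--             while j < n and not _is_word_char_rst(line[j]):
--                 j += 1
--             parts.append(line[i:j])
--         i = j
--     return ''.join(parts)
-- ===== Notes on version B (the rewrite author's own statement) =====
-- stated objective: alternative
-- what changed: Replaces A's per-character accumulator/flush state machine with a run-based scan that slices each line into maximal runs of word/non-word characters and maps word runs through the wrapping check.
import Mathlib
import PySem

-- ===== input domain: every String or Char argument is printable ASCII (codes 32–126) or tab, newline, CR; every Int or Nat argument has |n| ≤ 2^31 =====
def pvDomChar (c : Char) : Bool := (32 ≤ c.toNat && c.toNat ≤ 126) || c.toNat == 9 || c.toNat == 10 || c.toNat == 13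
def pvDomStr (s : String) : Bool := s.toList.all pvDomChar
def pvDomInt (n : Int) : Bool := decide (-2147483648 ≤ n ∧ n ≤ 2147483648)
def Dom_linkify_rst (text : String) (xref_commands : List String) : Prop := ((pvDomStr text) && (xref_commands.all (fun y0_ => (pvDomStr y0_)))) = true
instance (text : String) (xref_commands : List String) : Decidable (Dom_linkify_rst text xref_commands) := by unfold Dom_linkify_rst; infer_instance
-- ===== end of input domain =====

-- B replaces A's per-character accumulator/flush state machine by a run-based scan
-- (maximal word / non-word runs); equivalence of return values is proved below.

-- ===== PORT A =====
-- ch.islower() or ch.isdigit() or ch == '-'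
def pvIsWordA (c : Char) : Bool := PySem.Chars.islower c || PySem.Chars.isdigit c || (c == '-')

-- _flush_word_rst
def pvFlushA (word : List Char) (xref : List String) : List Char :=
  if PySem.Chars.isIn ['-'] word && xref.contains (String.ofList word) then
    ['`', '`'] ++ word ++ ['`', '`']
  else word

-- the body of A's inner per-character loop (state = (result, word))
def pvStepA (xref : List String) (st : List (List Char) × List Char) (ch : Char) :
    List (List Char) × List Char :=
  if pvIsWordA ch then (st.1, st.2 ++ [ch])
  else (st.1 ++ [pvFlushA st.2 xref, [ch]], [])

-- one iteration of A's outer loop over lines (a line as its list of code points)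
def pvLineA (xref : List String) (cs : List Char) : List Char :=
  -- indent = len(line) - len(line.lstrip(' ')) if line else 0 ; lstrip(' ') ported by hand
  -- as dropWhile (· == ' ') (exact: lstrip with an explicit char set strips exactly those)
  let indent : Nat := if cs.isEmpty then 0 else cs.length - (cs.dropWhile (fun c => c == ' ')).length
  if indent ≥ 3 then cs
  else
    let st := cs.foldl (pvStepA xref) ([], [])
    -- ''.join(result) = concatenation (exact)
    (st.1 ++ [pvFlushA st.2 xref]).flatten

def linkify_rst (text : String) (xref_commands : List String) : String :=
  String.ofList (PySem.Chars.join ['\n']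
    ((PySem.Chars.splitOn text.toList ['\n']).map (pvLineA xref_commands)))

-- ===== PORT B =====
def pvIsWordB (c : Char) : Bool := PySem.Chars.islower c || PySem.Chars.isdigit c || (c == '-')

-- _wrap_word_rst
def pvWrapB (word : List Char) (xref : List String) : List Char :=
  if PySem.Chars.isIn ['-'] word && xref.contains (String.ofList word) then
    ['`', '`'] ++ word ++ ['`', '`']
  else word

-- B's run scan: cut the line into maximal word / non-word runs
def pvRunsB (xref : List String) : List Char → List (List Char)
  | [] => []
  | c :: rest =>
    if pvIsWordB c then
      pvWrapB (c :: rest.takeWhile pvIsWordB) xref :: pvRunsB xref (rest.dropWhile pvIsWordB)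
    else
      (c :: rest.takeWhile (fun x => !pvIsWordB x)) ::
        pvRunsB xref (rest.dropWhile (fun x => !pvIsWordB x))
termination_by cs => cs.length
decreasing_by
  · have := List.length_dropWhile_le pvIsWordB rest; simp; omega
  · have := List.length_dropWhile_le (fun x => !pvIsWordB x) rest; simp; omega

-- _process_line_rst
def pvLineB (xref : List String) (cs : List Char) : List Char :=
  if PySem.Chars.startswith cs [' ', ' ', ' '] then cs
  -- ''.join(parts) = concatenation (exact)
  else (pvRunsB xref cs).flatten

def linkify_rst_alt (text : String) (xref_commands : List String) : String :=
  String.ofList (PySem.Chars.join ['\n']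
    ((PySem.Chars.splitOn text.toList ['\n']).map (pvLineB xref_commands)))

-- ===== PRECONDITION & SPEC =====
def Spec_linkify_rst (text : String) (xref_commands : List String) (out : String) : Prop := out = linkify_rst_alt text xref_commands
instance (text : String) (xref_commands : List String) (out : String) : Decidable (Spec_linkify_rst text xref_commands out) := by unfold Spec_linkify_rst; infer_instance

-- ===== CLAIM (what is proved, stated in full; the proofs are below) =====
def Claim_equal_linkify_rst : Prop := ∀ (text : String) (xref_commands : List String), Dom_linkify_rst text xref_commands → Spec_linkify_rst text xref_commands (linkify_rst text xref_commands)

-- ===== LEMMAS AND PROOFS =====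

-- common characterisation of one processed line (pending word w, remaining chars cs)
def pvProc (xref : List String) (w : List Char) : List Char → List Char
  | [] => pvFlushA w xref
  | c :: rest =>
    if pvIsWordA c then pvProc xref (w ++ [c]) rest
    else pvFlushA w xref ++ c :: pvProc xref [] rest

theorem pvFlushA_nil (xref : List String) : pvFlushA [] xref = [] := by
  have h : PySem.Chars.isIn ['-'] ([] : List Char) = false := by decide
  simp [pvFlushA, h]

theorem pvFoldA_eq (xref : List String) :
    ∀ (cs : List Char) (res : List (List Char)) (w : List Char),
      ((cs.foldl (pvStepA xref) (res, w)).1 ++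
        [pvFlushA (cs.foldl (pvStepA xref) (res, w)).2 xref]).flatten =
      res.flatten ++ pvProc xref w cs := by
  intro cs
  induction cs with
  | nil => intro res w; simp [pvProc]
  | cons c rest ih =>
    intro res w
    by_cases hc : pvIsWordA c = true
    · simp [List.foldl_cons, pvStepA, hc, ih, pvProc]
    · simp [List.foldl_cons, pvStepA, hc, ih, pvProc, List.flatten_append]

theorem pvProc_word (xref : List String) :
    ∀ (cs : List Char) (w : List Char),
      pvProc xref w cs =
        pvFlushA (w ++ cs.takeWhile pvIsWordA) xref ++
          pvProc xref [] (cs.dropWhile pvIsWordA) := by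
  intro cs
  induction cs with
  | nil => intro w; simp [pvProc, pvFlushA_nil]
  | cons c rest ih =>
    intro w
    by_cases hc : pvIsWordA c = true
    · simp [pvProc, hc, List.takeWhile_cons, List.dropWhile_cons, ih (w ++ [c])]
    · simp [pvProc, hc, List.takeWhile_cons, List.dropWhile_cons, pvFlushA_nil]

theorem pvProc_nonword (xref : List String) :
    ∀ (cs : List Char),
      cs.takeWhile (fun x => !pvIsWordA x) ++
        pvProc xref [] (cs.dropWhile (fun x => !pvIsWordA x)) =
      pvProc xref [] cs := by
  intro cs
  induction cs with
  | nil => simp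
  | cons c rest ih =>
    by_cases hc : pvIsWordA c = true
    · simp [List.takeWhile_cons, List.dropWhile_cons, hc]
    · simp [List.takeWhile_cons, List.dropWhile_cons, hc, pvProc, pvFlushA_nil, ih]

theorem pvIsWordB_eq : pvIsWordB = pvIsWordA := rfl

theorem pvRunsB_eq (xref : List String) (cs : List Char) :
    (pvRunsB xref cs).flatten = pvProc xref [] cs := by
  have main : ∀ (n : Nat) (cs : List Char), cs.length ≤ n →
      (pvRunsB xref cs).flatten = pvProc xref [] cs := by
    intro n
    induction n with
    | zero =>
      intro cs h
      have : cs = [] := List.eq_nil_of_length_eq_zero (Nat.le_zero.mp h)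
      subst this; simp [pvRunsB, pvProc, pvFlushA_nil]
    | succ n ih =>
      intro cs h
      match cs with
      | [] => simp [pvRunsB, pvProc, pvFlushA_nil]
      | c :: rest =>
        by_cases hc : pvIsWordA c = true
        · have hlen : (rest.dropWhile pvIsWordA).length ≤ n := by
            have := List.length_dropWhile_le pvIsWordA rest
            simp at h; omega
          rw [pvRunsB]
          simp only [pvIsWordB_eq, hc, if_pos]
          rw [List.flatten_cons, ih _ hlen]
          rw [pvProc_word xref (c :: rest) []]
          simp [List.takeWhile_cons, List.dropWhile_cons, hc, pvWrapB, pvFlushA]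
        · have hlen : (rest.dropWhile (fun x => !pvIsWordA x)).length ≤ n := by
            have := List.length_dropWhile_le (fun x => !pvIsWordA x) rest
            simp at h; omega
          rw [pvRunsB]
          simp only [pvIsWordB_eq, hc, if_neg, Bool.not_eq_true]
          rw [List.flatten_cons, ih _ hlen]
          rw [← pvProc_nonword xref (c :: rest)]
          simp [List.takeWhile_cons, List.dropWhile_cons, hc]
  exact main cs.length cs le_rfl

-- A's indent test agrees with B's startswith test
theorem pvIndent_iff (cs : List Char) :
    (3 ≤ (if cs.isEmpty then 0 else cs.length - (cs.dropWhile (fun c => c == ' ')).length)) ↔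
      [' ', ' ', ' '] <+: cs := by
  match cs with
  | [] => simp
  | [a] =>
    constructor
    · intro h
      by_cases ha : a = ' ' <;> simp [List.dropWhile_cons, ha] at h
    · intro h; simp [List.cons_prefix_cons] at h
  | [a, b] =>
    constructor
    · intro h
      by_cases ha : a = ' ' <;> by_cases hb : b = ' ' <;>
        simp [List.dropWhile_cons, ha, hb] at h
    · intro h; simp [List.cons_prefix_cons] at h
  | a :: b :: c :: rest =>
    by_cases ha : a = ' '
    · by_cases hb : b = ' '
      · by_cases hc : c = ' '
        · subst ha; subst hb; subst hc
          have := List.length_dropWhile_le (fun c => c == ' ') rest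
          simp [List.dropWhile_cons, List.cons_prefix_cons]
          omega
        · subst ha; subst hb
          constructor
          · intro h; exfalso; simp [List.dropWhile_cons, hc] at h
          · intro h; exfalso
            simp [List.cons_prefix_cons] at h
            exact hc h.symm
      · subst ha
        constructor
        · intro h; exfalso; simp [List.dropWhile_cons, hb] at h
        · intro h; exfalso
          simp [List.cons_prefix_cons] at h
          exact hb h.1.symm
    · constructor
      · intro h; exfalso; simp [List.dropWhile_cons, ha] at h
      · intro h; exfalso
        simp [List.cons_prefix_cons] at h
        exact ha h.1.symm

theorem pvLine_eq (xref : List String) (cs : List Char) :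
    pvLineA xref cs = pvLineB xref cs := by
  unfold pvLineA pvLineB
  have hsw : PySem.Chars.startswith cs [' ', ' ', ' '] = true ↔ [' ', ' ', ' '] <+: cs :=
    PySem.Chars.startswith_iff _ _
  by_cases hcond : [' ', ' ', ' '] <+: cs
  · rw [if_pos ((pvIndent_iff cs).mpr hcond), if_pos (hsw.mpr hcond)]
  · rw [if_neg (fun h => hcond ((pvIndent_iff cs).mp h)),
        if_neg (fun h => hcond (hsw.mp h))]
    rw [pvRunsB_eq]
    have h := pvFoldA_eq xref cs [] []
    simp only [List.flatten_nil, List.nil_append] at h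
    exact h

-- ===== VERDICT (by name: the statement is the Claim_ definition above) =====
theorem linkify_rst_spec : Claim_equal_linkify_rst := by
  intro text xref _
  unfold Spec_linkify_rst linkify_rst linkify_rst_alt
  have : pvLineA xref = pvLineB xref := funext (pvLine_eq xref)
  rw [this]
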